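-- pv_equiv track=rewrite | github.com/Nano112/Paint_it_black | sources/table_de_verite.py | fnc_to_3fnc
-- ===== SOURCE A (Python) =====
-- def fnc_to_3fnc(fnc, nbvar):
--     tfnc = []
--     for i in fnc:
--         while len(i) > 3:
--             nbvar += 1
--             partieun = []
--             for j in range(2):
--                 partieun.append(i.pop(0))
--             partieun.append(nbvar)
--             i.insert(0, -nbvar)
--             tfnc.append(partieun)
--         tfnc.append(i)
--     return tfnc
-- ===== SOURCE B (Python) =====
-- def fnc_to_3fnc(fnc, nbvar):
--     # Non-destructive one-pass rewrite: walk each long clause's middle literals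
--     # directly instead of repeatedly popping/inserting on the clause.
--     out = []
--     for clause in fnc:
--         if len(clause) <= 3:
--             out.append(clause)
--         else:
--             aux = nbvar + 1
--             out.append([clause[0], clause[1], aux])
--             for lit in clause[2:-2]:
--                 out.append([-aux, lit, aux + 1])
--                 aux += 1
--             nbvar = aux
--             out.append([-aux, clause[-2], clause[-1]])
--     return out
-- ===== Notes on version B (the rewrite author's own statement) =====
-- stated objective: alternative
-- what changed: B rewrites each long clause in one non-destructive walk over its middle literals (prefix triple, one bridge triple per middle literal, closing triple), instead of A's while-loop that repeatedly pops the first two literals and re-inserts the negated auxiliary at the clause front, mutating the clause in place.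
import Mathlib
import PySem

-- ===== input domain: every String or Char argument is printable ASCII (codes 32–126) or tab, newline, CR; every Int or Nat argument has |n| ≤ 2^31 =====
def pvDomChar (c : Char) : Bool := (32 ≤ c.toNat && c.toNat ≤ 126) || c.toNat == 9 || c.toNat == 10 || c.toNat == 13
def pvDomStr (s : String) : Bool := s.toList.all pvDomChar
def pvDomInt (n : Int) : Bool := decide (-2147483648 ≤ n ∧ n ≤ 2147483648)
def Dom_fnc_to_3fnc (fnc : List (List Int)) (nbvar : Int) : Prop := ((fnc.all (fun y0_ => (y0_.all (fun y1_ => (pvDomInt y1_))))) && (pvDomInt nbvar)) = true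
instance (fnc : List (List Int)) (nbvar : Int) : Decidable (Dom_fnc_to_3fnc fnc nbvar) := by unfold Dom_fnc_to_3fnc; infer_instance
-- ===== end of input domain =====

-- B rewrites each long clause in one non-destructive walk over its middle literals instead of A's
-- repeated pop/insert on the clause (objective: alternative decomposition, same cost). Equivalence
-- is about the RETURN value only: Python A mutates the input clause lists in place, B does not.

-- ===== PORT A =====
-- A's while-loop on one clause `i` with accumulator `tfnc`; the two `i.pop(0)` calls and
-- `i.insert(0, -nbvar)` are ported by the pattern match on `i` (length > 3 guarantees ≥ 2 elements).
def pvA_while (i : List Int) (nbvar : Int) (tfnc : List (List Int)) : List (List Int) × Int :=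
  if i.length > 3 then
    match i with
    | a :: b :: rest =>
        -- nbvar += 1; partieun = [i.pop(0), i.pop(0), nbvar]; i.insert(0, -nbvar); tfnc.append(partieun)
        pvA_while ((-(nbvar + 1)) :: rest) (nbvar + 1) (tfnc ++ [[a, b, nbvar + 1]])
    | _ => (tfnc, nbvar)  -- unreachable: length > 3
  else (tfnc ++ [i], nbvar)
termination_by i.length
decreasing_by simp_all

def fnc_to_3fnc (fnc : List (List Int)) (nbvar : Int) : List (List Int) :=
  (fnc.foldl (fun st i => pvA_while i st.2 st.1) (([] : List (List Int)), nbvar)).1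

-- ===== PORT B =====
-- one clause of Source B's loop body: state = (out, nbvar)
def pvB_step (st : List (List Int) × Int) (clause : List Int) : List (List Int) × Int :=
  if (clause.length : Int) ≤ 3 then (st.1 ++ [clause], st.2)
  else
    let aux := st.2 + 1
    let out1 := st.1 ++ [[PySem.List.pyGetD clause 0 0, PySem.List.pyGetD clause 1 0, aux]]
    let p := (PySem.List.slice clause (some 2) (some (-2))).foldl
        (fun (q : List (List Int) × Int) lit => (q.1 ++ [[-q.2, lit, q.2 + 1]], q.2 + 1))
        (out1, aux)
    (p.1 ++ [[-p.2, PySem.List.pyGetD clause (-2) 0, PySem.List.pyGetD clause (-1) 0]], p.2)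

def fnc_to_3fnc_alt (fnc : List (List Int)) (nbvar : Int) : List (List Int) :=
  (fnc.foldl pvB_step (([] : List (List Int)), nbvar)).1

-- ===== PRECONDITION & SPEC =====
def Spec_fnc_to_3fnc (fnc : List (List Int)) (nbvar : Int) (out : List (List Int)) : Prop := out = fnc_to_3fnc_alt fnc nbvar
instance (fnc : List (List Int)) (nbvar : Int) (out : List (List Int)) : Decidable (Spec_fnc_to_3fnc fnc nbvar out) := by unfold Spec_fnc_to_3fnc; infer_instance

-- ===== CLAIM (what is proved, stated in full; the proofs are below) =====
def Claim_equal_fnc_to_3fnc : Prop := ∀ (fnc : List (List Int)) (nbvar : Int), Dom_fnc_to_3fnc fnc nbvar → Spec_fnc_to_3fnc fnc nbvar (fnc_to_3fnc fnc nbvar)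

-- ===== LEMMAS AND PROOFS =====

theorem slice_2_neg2 (l : List Int) (h : 4 ≤ l.length) :
    PySem.List.slice l (some 2) (some (-2)) = (l.drop 2).take (l.length - 4) := by
  simp [PySem.List.slice]
  rw [Nat.min_eq_left (by omega), show l.length - 2 - 2 = l.length - 4 by omega]

theorem pyGetD_neg2_cons (x : Int) (xs : List Int) (h : 2 ≤ xs.length) :
    PySem.List.pyGetD (x :: xs) (-2) 0 = PySem.List.pyGetD xs (-2) 0 := by
  rw [PySem.List.pyGetD_neg_ofNat _ 2 0 (by omega) (by simp; omega),
      PySem.List.pyGetD_neg_ofNat _ 2 0 (by omega) (by omega)]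
  simp
  rw [List.getElem_cons]
  split
  · omega
  · congr 1
theorem pyGetD_neg1_cons (x : Int) (xs : List Int) (h : 1 ≤ xs.length) :
    PySem.List.pyGetD (x :: xs) (-1) 0 = PySem.List.pyGetD xs (-1) 0 := by
  rw [PySem.List.pyGetD_neg_ofNat _ 1 0 (by omega) (by simp),
      PySem.List.pyGetD_neg_ofNat _ 1 0 (by omega) (by omega)]
  simp
  rw [List.getElem_cons]
  split
  · omega
  · congr 1

theorem pvB_peel (a b c : Int) (rest2 : List Int) (h : 2 ≤ rest2.length) (v : Int) (t : List (List Int)) :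
    pvB_step (t ++ [[a, b, v + 1]], v + 1) ((-(v + 1)) :: c :: rest2) =
    pvB_step (t, v) (a :: b :: c :: rest2) := by
  have h1 : ¬ (((((-(v+1)) :: c :: rest2).length : Int)) ≤ 3) := by simp; omega
  have h2 : ¬ (((a :: b :: c :: rest2).length : Int) ≤ 3) := by simp; omega
  simp only [pvB_step, h1, h2, if_false]
  rw [slice_2_neg2 _ (by simp; omega), slice_2_neg2 _ (by simp; omega)]
  simp only [List.drop_succ_cons, List.drop_zero, List.length_cons]
  rw [show rest2.length + 1 + 1 - 4 = rest2.length - 2 by omega,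
      show rest2.length + 1 + 1 + 1 - 4 = (rest2.length - 2) + 1 by omega,
      List.take_succ_cons]
  simp only [List.foldl_cons]
  rw [pyGetD_neg2_cons _ (c :: rest2) (by simp only [List.length_cons]; omega),
      pyGetD_neg2_cons a (b :: c :: rest2) (by simp only [List.length_cons]; omega),
      pyGetD_neg2_cons b (c :: rest2) (by simp only [List.length_cons]; omega),
      pyGetD_neg1_cons _ (c :: rest2) (by simp only [List.length_cons]; omega),
      pyGetD_neg1_cons a (b :: c :: rest2) (by simp only [List.length_cons]; omega),
      pyGetD_neg1_cons b (c :: rest2) (by simp only [List.length_cons]; omega)]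
  have p1 : (0:Int) ≤ (rest2.length:Int) + 1 := by positivity
  have p2 : (0:Int) ≤ (rest2.length:Int) + 1 + 1 := by positivity
  simp [PySem.List.pyGetD, PySem.List.pyGet?, PySem.List.pyIdx?, p1, p2]

theorem pvA_small (i : List Int) (h : i.length ≤ 3) (v : Int) (t : List (List Int)) :
    pvA_while i v t = pvB_step (t, v) i := by
  rcases i with _ | ⟨a, _ | ⟨b, _ | ⟨c, _ | ⟨d, r⟩⟩⟩⟩ <;> simp only [List.length_cons, List.length_nil] at h <;> try omega
  all_goals rw [pvA_while, if_neg (by simp)]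
  all_goals simp [pvB_step]

theorem pvA_eq_pvB_clause : ∀ (n : Nat) (i : List Int), i.length = n → ∀ (v : Int) (t : List (List Int)),
    pvA_while i v t = pvB_step (t, v) i := by
  intro n
  induction n using Nat.strong_induction_on with
  | _ n ih =>
    intro i hlen v t
    by_cases h : i.length > 3
    · rcases i with _ | ⟨a, _ | ⟨b, _ | ⟨c, _ | ⟨d, rest2'⟩⟩⟩⟩ <;> simp only [List.length_cons, List.length_nil] at h <;> try omega
      rw [pvA_while, if_pos (by simp)]
      rw [ih ((-(v+1)) :: c :: d :: rest2').length (by simp at hlen ⊢; omega) _ rfl]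
      rcases rest2' with _ | ⟨e, rest3⟩
      · simp [pvB_step, PySem.List.slice, PySem.List.pyGetD, PySem.List.pyGet?, PySem.List.pyIdx?]
      · exact pvB_peel a b c (d :: e :: rest3) (by simp) v t
    · exact pvA_small i (by omega) v t

theorem foldl_AB (fnc : List (List Int)) : ∀ (st : List (List Int) × Int),
    fnc.foldl (fun st i => pvA_while i st.2 st.1) st = fnc.foldl pvB_step st := by
  induction fnc with
  | nil => intro st; rfl
  | cons i rest ih =>
    intro st
    rw [List.foldl_cons, List.foldl_cons, pvA_eq_pvB_clause i.length i rfl]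
    exact ih _

-- ===== VERDICT (by name: the statement is the Claim_ definition above) =====
theorem fnc_to_3fnc_spec : Claim_equal_fnc_to_3fnc := by
  intro fnc nbvar _
  unfold Spec_fnc_to_3fnc fnc_to_3fnc fnc_to_3fnc_alt
  rw [foldl_AB]
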